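-- pv_equiv track=rewrite | github.com/Kev-mi/helpfunctions | functions.py | arithmetic_series_2_generator
-- ===== SOURCE A (Python) =====
-- def polynomial_arithmetic_series_eval(coeff_list, iterations):
--     sums = []
--     coeff_list.reverse()
--     for x in range(1, iterations+1):
--         total = 0
--         for power, coeff in enumerate(coeff_list):
--             total += (x ** power) * coeff
--         sums.append(total)
--     return sums
--
-- def arithmetic_series_2_generator(arithmetic_series_list, coefficient, solution_coefficients):
--     arithmetic_series_list_2 = [coefficient]
--     for x in range(1, len(arithmetic_series_list)):
--         arithmetic_series_list_2.append(0)
--     solution_coefficients.append(arithmetic_series_list_2[0])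
--     arithmetic_series_list_2 = polynomial_arithmetic_series_eval(arithmetic_series_list_2, len(arithmetic_series_list))
--     for x in range(0, len(arithmetic_series_list_2)):
--         arithmetic_series_list_2[x] = arithmetic_series_list[x] - arithmetic_series_list_2[x]
--     return arithmetic_series_list_2, solution_coefficients
-- ===== SOURCE B (Python) =====
-- def arithmetic_series_2_generator(arithmetic_series_list, coefficient, solution_coefficients):
--     # The degenerate polynomial [coefficient, 0, ..., 0] evaluates at x to
--     # coefficient * x**(n-1); compute each term directly in one pass.
--     # Mutates solution_coefficients in place, exactly like A.
--     solution_coefficients.append(coefficient)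
--     p = len(arithmetic_series_list) - 1
--     diffs = [a - coefficient * (i + 1) ** p
--              for i, a in enumerate(arithmetic_series_list)]
--     return diffs, solution_coefficients
-- ===== Notes on version B (the rewrite author's own statement) =====
-- stated objective: faster
-- what changed: B replaces the build-a-zero-padded-list plus nested evaluation loop (inner enumerate over n coefficients for each of n points) and the in-place subtraction pass by a single list comprehension computing a[i] - coefficient*(i+1)**(n-1) directly, since only one coefficient is nonzero.
import Mathlib
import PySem

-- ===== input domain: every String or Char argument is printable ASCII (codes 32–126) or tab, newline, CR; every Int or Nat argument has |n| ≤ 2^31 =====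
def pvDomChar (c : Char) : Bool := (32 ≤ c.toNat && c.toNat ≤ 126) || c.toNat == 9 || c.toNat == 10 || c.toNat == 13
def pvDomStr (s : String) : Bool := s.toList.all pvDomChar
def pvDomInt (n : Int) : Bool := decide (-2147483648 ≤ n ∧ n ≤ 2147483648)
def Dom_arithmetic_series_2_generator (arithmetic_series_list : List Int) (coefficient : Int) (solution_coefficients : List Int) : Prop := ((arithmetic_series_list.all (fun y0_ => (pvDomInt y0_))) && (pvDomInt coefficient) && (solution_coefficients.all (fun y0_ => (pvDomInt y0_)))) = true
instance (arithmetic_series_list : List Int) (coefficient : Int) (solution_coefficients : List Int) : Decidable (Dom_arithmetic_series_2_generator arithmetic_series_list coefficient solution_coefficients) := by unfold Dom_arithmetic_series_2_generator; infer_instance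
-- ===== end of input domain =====

-- B evaluates the single nonzero coefficient's term directly in one pass (O(n) vs A's O(n^2));
-- both Pythons append coefficient to solution_coefficients in place, equivalence is about the return value.


-- ===== PORT A =====
-- polynomial_arithmetic_series_eval: reverse, then for x in 1..iterations sum x**power * coeff.
-- (x ** power: power is a nonnegative enumerate index, ported as .toNat — exact.)
def polynomial_arithmetic_series_eval (coeff_list : List Int) (iterations : Int) : List Int :=
  let rev := coeff_list.reverse
  (PySem.List.pyRange 1 (iterations + 1) 1).foldl
    (fun sums x =>
      sums ++ [(PySem.List.enumerate rev 0).foldl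
                 (fun total pc => total + x ^ pc.1.toNat * pc.2) 0])
    []

def arithmetic_series_2_generator (arithmetic_series_list : List Int) (coefficient : Int) (solution_coefficients : List Int) : List Int × List Int :=
  let l2 := (PySem.List.pyRange 1 (PySem.List.len arithmetic_series_list) 1).foldl
      (fun acc _ => acc ++ [(0 : Int)]) [coefficient]
  let sols := solution_coefficients ++ [PySem.List.pyGetD l2 0 0]
  let l2e := polynomial_arithmetic_series_eval l2 (PySem.List.len arithmetic_series_list)
  let l3 := (PySem.List.pyRange 0 (PySem.List.len l2e) 1).foldl
      (fun acc x =>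
        PySem.List.pySetD acc x
          (PySem.List.pyGetD arithmetic_series_list x 0 - PySem.List.pyGetD acc x 0)) l2e
  (l3, sols)

-- ===== PORT B =====
def arithmetic_series_2_generator_alt (arithmetic_series_list : List Int) (coefficient : Int) (solution_coefficients : List Int) : List Int × List Int :=
  let p := arithmetic_series_list.length - 1
  ((PySem.List.enumerate arithmetic_series_list 0).map
      (fun ia => ia.2 - coefficient * (ia.1 + 1) ^ p),
   solution_coefficients ++ [coefficient])

-- ===== PRECONDITION & SPEC =====
def Spec_arithmetic_series_2_generator (arithmetic_series_list : List Int) (coefficient : Int) (solution_coefficients : List Int) (out : List Int × List Int) : Prop := out = arithmetic_series_2_generator_alt arithmetic_series_list coefficient solution_coefficients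
instance (arithmetic_series_list : List Int) (coefficient : Int) (solution_coefficients : List Int) (out : List Int × List Int) : Decidable (Spec_arithmetic_series_2_generator arithmetic_series_list coefficient solution_coefficients out) := by unfold Spec_arithmetic_series_2_generator; infer_instance

-- ===== CLAIM (what is proved, stated in full; the proofs are below) =====
def Claim_equal_arithmetic_series_2_generator : Prop := ∀ (arithmetic_series_list : List Int) (coefficient : Int) (solution_coefficients : List Int), Dom_arithmetic_series_2_generator arithmetic_series_list coefficient solution_coefficients → Spec_arithmetic_series_2_generator arithmetic_series_list coefficient solution_coefficients (arithmetic_series_2_generator arithmetic_series_list coefficient solution_coefficients)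

-- ===== LEMMAS AND PROOFS =====

-- the zero-padding loop builds init ++ replicate r.length 0
lemma pv_append_zeros (r : List Int) : ∀ (init : List Int),
    r.foldl (fun acc _ => acc ++ [(0 : Int)]) init = init ++ List.replicate r.length 0 := by
  induction r with
  | nil => intro init; simp
  | cons x xs ih =>
      intro init
      simp only [List.foldl_cons, ih, List.length_cons, List.replicate_succ]
      simp

-- folding the inner sum over enumerated zeros leaves the accumulator unchanged
lemma pv_zeros_sum (x : Int) : ∀ (k : Nat) (s : Int) (t : Int),
    (PySem.List.enumerate (List.replicate k (0 : Int)) s).foldl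
      (fun total pc => total + x ^ pc.1.toNat * pc.2) t = t := by
  intro k
  induction k with
  | zero => intro s t; simp [PySem.List.enumerate_nil]
  | succ k ih => intro s t; simp [List.replicate_succ, PySem.List.enumerate_cons, ih]

-- the inner sum over [0,...,0,c] is x^k * c
lemma pv_inner_sum (x c : Int) (k : Nat) :
    (PySem.List.enumerate (List.replicate k (0 : Int) ++ [c]) 0).foldl
      (fun total pc => total + x ^ pc.1.toNat * pc.2) 0 = x ^ k * c := by
  rw [PySem.List.enumerate_append]
  rw [List.foldl_append]
  rw [pv_zeros_sum]
  simp [PySem.List.enumerate_cons, PySem.List.enumerate_nil]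

-- the evaluator on the degenerate coefficient list is a map over the range
lemma pv_eval_eq (c : Int) (m : Nat) (n : Int) :
    polynomial_arithmetic_series_eval (c :: List.replicate m (0 : Int)) n
      = (PySem.List.pyRange 1 (n + 1) 1).map (fun x => x ^ m * c) := by
  unfold polynomial_arithmetic_series_eval
  have hrev : (c :: List.replicate m (0 : Int)).reverse = List.replicate m 0 ++ [c] := by simp
  simp only [hrev]
  rw [PySem.List.foldl_append_singleton_eq_map]
  simp only [pv_inner_sum]
  simp

-- the subtraction loop: setting each index j to l[j] - acc[j] over range j..m
lemma pv_setfold (l : List Int) : ∀ (fuel j : Nat) (acc : List Int),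
    acc.length = l.length → j + fuel = l.length →
    (PySem.List.pyRange (j : Int) (l.length : Int) 1).foldl
      (fun a x => PySem.List.pySetD a x (PySem.List.pyGetD l x 0 - PySem.List.pyGetD a x 0)) acc
    = acc.take j ++ (List.zipWith (fun u v => u - v) l acc).drop j := by
  intro fuel
  induction fuel with
  | zero =>
      intro j acc hlen hj
      rw [PySem.List.pyRange_one_eq_nil (by omega)]
      simp only [List.foldl_nil]
      have : j = l.length := by omega
      subst this
      rw [List.take_of_length_le (by omega), List.drop_of_length_le (by simp [List.length_zipWith])]
      simp
  | succ fuel ih =>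
      intro j acc hlen hj
      have hjl : j < l.length := by omega
      rw [PySem.List.pyRange_one_cons (by exact_mod_cast hjl)]
      simp only [List.foldl_cons]
      have hstep : ((j : Int) + 1) = ((j + 1 : Nat) : Int) := by push_cast; ring
      set v := PySem.List.pyGetD l (j:Int) 0 - PySem.List.pyGetD acc (j:Int) 0 with hv
      rw [hstep, PySem.List.pySetD_natCast]
      rw [ih (j+1) (acc.set j v) (by simp [hlen]) (by omega)]
      -- now combine
      have hgl : PySem.List.pyGetD l (j:Int) 0 = l[j] := by
        simp [PySem.List.pyGetD_natCast, List.getD_eq_getElem?_getD, List.getElem?_eq_getElem hjl]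
      have hga : PySem.List.pyGetD acc (j:Int) 0 = acc[j]'(by omega) := by
        simp [PySem.List.pyGetD_natCast, List.getD_eq_getElem?_getD, List.getElem?_eq_getElem (show j < acc.length by omega)]
      have hzlen : (List.zipWith (fun u v => u - v) l acc).length = l.length := by
        simp [List.length_zipWith]; omega
      have htake : (acc.set j v).take (j+1) = acc.take j ++ [v] := by
        rw [List.set_eq_take_append_cons_drop, if_pos (show j < acc.length by omega)]
        rw [List.take_append]
        simp [List.length_take, Nat.min_def, if_pos (Nat.le_of_lt (show j < acc.length by omega))]
      have hdropz : (List.zipWith (fun u v => u - v) l (acc.set j v)).drop (j+1)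
          = (List.zipWith (fun u v => u - v) l acc).drop (j+1) := by
        apply List.ext_getElem
        · simp [List.length_zipWith]
        · intro i h1 h2
          simp only [List.getElem_drop, List.getElem_zipWith, List.getElem_set]
          rw [if_neg (by omega)]
      have hdrop : (List.zipWith (fun u v => u - v) l acc).drop j
          = (l[j] - acc[j]'(by omega)) :: (List.zipWith (fun u v => u - v) l acc).drop (j+1) := by
        rw [List.drop_eq_getElem_cons (by omega)]
        simp [List.getElem_zipWith]
      rw [htake, hdropz, hdrop]
      simp [hv, hgl, hga, List.append_assoc]

-- A's subtraction result equals B's comprehension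
lemma pv_zip_eq (l : List Int) (c : Int) :
    List.zipWith (fun u v => u - v) l
        ((PySem.List.pyRange 1 ((l.length : Int) + 1) 1).map (fun x => x ^ (l.length - 1) * c))
      = (PySem.List.enumerate l 0).map (fun ia => ia.2 - c * (ia.1 + 1) ^ (l.length - 1)) := by
  apply List.ext_getElem
  · simp [PySem.List.length_pyRange_one, PySem.List.length_enumerate]
  · intro i h1 h2
    simp only [List.getElem_zipWith, List.getElem_map, PySem.List.getElem_pyRange_one,
      PySem.List.getElem_enumerate]
    ring_nf

-- ===== VERDICT (by name: the statement is the Claim_ definition above) =====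
theorem arithmetic_series_2_generator_spec : Claim_equal_arithmetic_series_2_generator := by
  intro l c s _hdom
  unfold Spec_arithmetic_series_2_generator arithmetic_series_2_generator arithmetic_series_2_generator_alt
  simp only [PySem.List.len_eq]
  rw [pv_append_zeros]
  have hm : (PySem.List.pyRange 1 (l.length : Int) 1).length = l.length - 1 := by
    rw [PySem.List.length_pyRange_one]; omega
  rw [hm, List.singleton_append, PySem.List.pyGetD_zero_cons, pv_eval_eq]
  have hlen : ((PySem.List.pyRange 1 ((l.length : Int) + 1) 1).map
      (fun x => x ^ (l.length - 1) * c)).length = l.length := by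
    rw [List.length_map, PySem.List.length_pyRange_one]; omega
  rw [hlen]
  have hs := pv_setfold l l.length 0 _ hlen (by omega)
  norm_num at hs
  rw [hs]
  rw [pv_zip_eq]
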